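-- pv_equiv track=rewrite | github.com/petertumfart/preprocessing_pipeline_mne | preprocessing_ptu.py | _generate_markers_of_interest
-- ===== SOURCE A (Python) =====
-- def _generate_markers_of_interest(trial_type, period, position, state):
--     """
--     Generates markers of interest based on provided parameters
--
--     :param trial_type: A list of trial types
--     :type trial_type: list
--     :param period: A list of periods
--     :type period: list
--     :param position: A list of positions
--     :type position: list
--     :param state: A list of states
--     :type state: list
--     :return: A list of markers of interest
--     :rtype: list
--     """
--     moi = []
--     for tp in trial_type:
--         for per in period:
--             for pos in position:
--                 for s in state:
--                     moi.append(tp + '_' + per + pos + s)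
--     return moi
-- ===== SOURCE B (Python) =====
-- def _generate_markers_of_interest(trial_type, period, position, state):
--     """Rank-decoding: enumerate the flat index 0..N-1 of the 4-way product and
--     decode each rank into (tp, per, pos, s) with divmod, instead of nested loops."""
--     n1, n2, n3 = len(period), len(position), len(state)
--     total = len(trial_type) * n1 * n2 * n3
--     moi = []
--     for k in range(total):
--         q, s = divmod(k, n3)
--         q, pos = divmod(q, n2)
--         tp, per = divmod(q, n1)
--         moi.append(trial_type[tp] + '_' + period[per] + position[pos] + state[s])
--     return moi
-- ===== Notes on version B (the rewrite author's own statement) =====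
-- stated objective: alternative
-- what changed: Replaces the 4-nested append loops with a single loop over the flat rank 0..N-1 that decodes each rank into the four indices via divmod and indexes the input lists directly.
import Mathlib
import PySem

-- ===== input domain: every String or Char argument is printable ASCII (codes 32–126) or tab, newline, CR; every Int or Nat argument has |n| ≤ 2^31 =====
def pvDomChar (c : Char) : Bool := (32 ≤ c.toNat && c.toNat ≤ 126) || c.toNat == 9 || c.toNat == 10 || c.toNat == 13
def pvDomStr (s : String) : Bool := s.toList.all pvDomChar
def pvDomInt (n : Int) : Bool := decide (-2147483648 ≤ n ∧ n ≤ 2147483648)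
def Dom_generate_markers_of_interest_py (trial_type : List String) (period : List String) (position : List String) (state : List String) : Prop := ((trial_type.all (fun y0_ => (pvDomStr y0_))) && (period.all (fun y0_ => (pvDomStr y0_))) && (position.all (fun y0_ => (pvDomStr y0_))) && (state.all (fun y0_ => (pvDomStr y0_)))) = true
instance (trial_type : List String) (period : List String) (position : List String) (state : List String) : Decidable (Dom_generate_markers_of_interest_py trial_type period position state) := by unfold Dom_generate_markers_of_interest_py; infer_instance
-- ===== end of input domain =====

-- B enumerates the flat rank 0..N-1 of the 4-way product and decodes each rank with divmod, instead of A's 4-nested append loops; objective: alternative (same cost, different algorithm). Ports are about the return value only.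


-- ===== PORT A =====
-- Port of A: four nested loops appending one marker at a time to moi.
def generate_markers_of_interest_py (trial_type : List String) (period : List String) (position : List String) (state : List String) : List String :=
  trial_type.foldl (fun moi tp =>
    period.foldl (fun moi per =>
      position.foldl (fun moi pos =>
        state.foldl (fun moi s => moi ++ [tp ++ "_" ++ per ++ pos ++ s]) moi) moi) moi) []

-- ===== PORT B =====
-- Port of B: one loop over the flat rank 0..total-1; each rank is decoded with divmod
-- into the four indices. divmod is ported as (floordiv, mod) and list indexing as
-- pyGetD with default "": exact, because in every executed iteration the divisors are
-- nonzero and the indices in range (total = 0 whenever any length is 0).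
def generate_markers_of_interest_py_alt (trial_type : List String) (period : List String) (position : List String) (state : List String) : List String :=
  let n1 : Int := period.length
  let n2 : Int := position.length
  let n3 : Int := state.length
  let total : Int := (trial_type.length : Int) * n1 * n2 * n3
  (PySem.List.pyRange 0 total 1).foldl (fun moi k =>
    let q1 := PySem.Int.floordiv k n3
    let s := PySem.Int.mod k n3
    let q2 := PySem.Int.floordiv q1 n2
    let pos := PySem.Int.mod q1 n2
    let tp := PySem.Int.floordiv q2 n1
    let per := PySem.Int.mod q2 n1
    moi ++ [PySem.List.pyGetD trial_type tp "" ++ "_" ++ PySem.List.pyGetD period per "" ++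
            PySem.List.pyGetD position pos "" ++ PySem.List.pyGetD state s ""]) []

-- ===== PRECONDITION & SPEC =====
def Spec_generate_markers_of_interest_py (trial_type : List String) (period : List String) (position : List String) (state : List String) (out : List String) : Prop := out = generate_markers_of_interest_py_alt trial_type period position state
instance (trial_type : List String) (period : List String) (position : List String) (state : List String) (out : List String) : Decidable (Spec_generate_markers_of_interest_py trial_type period position state out) := by unfold Spec_generate_markers_of_interest_py; infer_instance

-- ===== CLAIM (what is proved, stated in full; the proofs are below) =====
def Claim_equal_generate_markers_of_interest_py : Prop := ∀ (trial_type : List String) (period : List String) (position : List String) (state : List String), Dom_generate_markers_of_interest_py trial_type period position state → Spec_generate_markers_of_interest_py trial_type period position state (generate_markers_of_interest_py trial_type period position state)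

-- ===== LEMMAS AND PROOFS =====

-- A flat map over range (m*n) splits into an outer/inner pair of loops (row-major ranks).
theorem gmoi_map_range_mul {α : Type} (m n : Nat) (f : Nat → α) :
    (List.range (m * n)).map f
      = (List.range m).flatMap (fun i => (List.range n).map (fun j => f (i * n + j))) := by
  induction m with
  | zero => simp
  | succ m ih =>
    have h : (m + 1) * n = m * n + n := by ring
    rw [h, List.range_add, List.map_append, List.map_map, List.range_succ,
      List.flatMap_append, ih]
    simp [Function.comp_def]

-- flatMap over a list equals flatMap over its index range (getD with an unused default).
theorem gmoi_flatMap_eq_range {β : Type} (xs : List String) (g : String → List β) :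
    xs.flatMap g = (List.range xs.length).flatMap (fun i => g (xs.getD i "")) := by
  induction xs with
  | nil => simp
  | cons x xs ih =>
    simp [List.range_succ_eq_map, List.flatMap_map, ih]

theorem gmoi_map_eq_range {β : Type} (xs : List String) (f : String → β) :
    xs.map f = (List.range xs.length).map (fun i => f (xs.getD i "")) := by
  induction xs with
  | nil => simp
  | cons x xs ih =>
    simp [List.range_succ_eq_map, List.map_map, ih, Function.comp_def]

-- Rank decoding: divmod chain recovers the four row-major indices.
theorem gmoi_decode (n1 n2 n3 tp per pos s : Nat)
    (h1 : per < n1) (h2 : pos < n2) (h3 : s < n3) :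
    (tp * (n1 * (n2 * n3)) + (per * (n2 * n3) + (pos * n3 + s))) / n3
        = tp * (n1 * n2) + (per * n2 + pos) ∧
    (tp * (n1 * (n2 * n3)) + (per * (n2 * n3) + (pos * n3 + s))) % n3 = s ∧
    (tp * (n1 * n2) + (per * n2 + pos)) / n2 = tp * n1 + per ∧
    (tp * (n1 * n2) + (per * n2 + pos)) % n2 = pos ∧
    (tp * n1 + per) / n1 = tp ∧ (tp * n1 + per) % n1 = per := by
  have e3 : tp * (n1 * (n2 * n3)) + (per * (n2 * n3) + (pos * n3 + s))
      = n3 * (tp * (n1 * n2) + (per * n2 + pos)) + s := by ring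
  have e2 : tp * (n1 * n2) + (per * n2 + pos) = n2 * (tp * n1 + per) + pos := by ring
  have e1 : tp * n1 + per = n1 * tp + per := by ring
  refine ⟨?_, ?_, ?_, ?_, ?_, ?_⟩
  · rw [e3, Nat.mul_add_div (by omega), Nat.div_eq_of_lt h3]; omega
  · rw [e3, Nat.mul_add_mod, Nat.mod_eq_of_lt h3]
  · rw [e2, Nat.mul_add_div (by omega), Nat.div_eq_of_lt h2]; omega
  · rw [e2, Nat.mul_add_mod, Nat.mod_eq_of_lt h2]
  · rw [e1, Nat.mul_add_div (by omega), Nat.div_eq_of_lt h1]; omega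
  · rw [e1, Nat.mul_add_mod, Nat.mod_eq_of_lt h1]

-- A's nested foldls are the nested flatMap of all four lists.
theorem gmoi_A_flatMap (trial_type period position state : List String) :
    generate_markers_of_interest_py trial_type period position state =
      trial_type.flatMap (fun tp => period.flatMap (fun per =>
        position.flatMap (fun pos => state.map (fun s => tp ++ "_" ++ per ++ pos ++ s)))) := by
  unfold generate_markers_of_interest_py
  simp only [PySem.List.foldl_append_singleton_eq_map, PySem.List.foldl_append_eq_flatMap,
    List.nil_append]

theorem generate_markers_of_interest_py_spec : Claim_equal_generate_markers_of_interest_py := by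
  intro tt p posl st _
  unfold Spec_generate_markers_of_interest_py
  rw [gmoi_A_flatMap]
  simp only [generate_markers_of_interest_py_alt]
  rw [PySem.List.foldl_append_singleton_eq_map, List.nil_append,
    show ((tt.length : Int) * ↑p.length * ↑posl.length * ↑st.length)
        = ((tt.length * (p.length * (posl.length * st.length)) : Nat) : Int) from by
      push_cast; ring,
    PySem.List.pyRange_zero_nat, List.map_map]
  simp only [gmoi_map_range_mul]
  simp only [gmoi_flatMap_eq_range, gmoi_map_eq_range]
  refine List.flatMap_congr ?_
  intro tp htp
  refine List.flatMap_congr ?_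
  intro per hper
  refine List.flatMap_congr ?_
  intro pos hpos
  refine List.map_congr_left ?_
  intro s hs
  rw [List.mem_range] at hper hpos hs
  obtain ⟨d1, d2, d3, d4, d5, d6⟩ :=
    gmoi_decode p.length posl.length st.length tp per pos s hper hpos hs
  simp only [Function.comp_def, PySem.Int.floordiv_natCast, PySem.Int.mod_natCast,
    d1, d2, d3, d4, d5, d6, PySem.List.pyGetD_natCast]
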